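-- pv_equiv track=rewrite | github.com/Centrattic/pivotal-research | evaluating-probes/src/visualize/viz_core.py | patterns_from_config
-- ===== SOURCE A (Python) =====
-- from typing import Dict, List, Optional, Tuple
--
-- def patterns_from_config(architectures: List[Dict]) -> Dict[str, List[str]]:
--     """Build probe pattern groups strictly from architecture config_names in the config.
--
--     Returns mapping: probe_type -> list of pattern substrings to match in filenames.
--     """
--     groups: Dict[str, List[str]] = {'linear': [], 'sae': [], 'attention': [], 'act_sim': []}
--     for arch in architectures:
--         config_name = arch.get('config_name') or arch.get('name') or ''
--         lname = config_name.lower()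
--         if 'sae' in lname:
--             groups['sae'].append(config_name)
--         elif 'act_sim' in lname:
--             groups['act_sim'].append(config_name)
--         elif 'attention' in lname:
--             groups['attention'].append(config_name)
--         elif 'linear' in lname:
--             groups['linear'].append(config_name)
--     # Deduplicate
--     for k in groups:
--         seen = set()
--         groups[k] = [p for p in groups[k] if not (p in seen or seen.add(p))]
--     return groups
-- ===== SOURCE B (Python) =====
-- from typing import Dict, List
--
-- KEYWORDS = ('sae', 'act_sim', 'attention', 'linear')
--
--
-- def _classify(lname: str):
--     """First keyword (in priority order) occurring in lname, else None."""
--     return next((k for k in KEYWORDS if k in lname), None)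
--
--
-- def patterns_from_config(architectures: List[Dict]) -> Dict[str, List[str]]:
--     """Tag every config name with its group once, then build each group
--     declaratively by filtering the tagged list and deduplicating with
--     dict.fromkeys (ordered-set dedup)."""
--     tagged = [(lambda n: (_classify(n.lower()), n))(
--                   arch.get('config_name') or arch.get('name') or '')
--               for arch in architectures]
--     return {g: list(dict.fromkeys(n for t, n in tagged if t == g))
--             for g in ('linear', 'sae', 'attention', 'act_sim')}
-- ===== Notes on version B (the rewrite author's own statement) =====
-- stated objective: alternative
-- what changed: Replaces A's dispatch loop into four mutable buckets plus a separate seen-set dedup pass with a tag-then-group scheme: each name is classified once via a first-match over a keyword priority tuple, and every group is then built declaratively by filtering the tagged list and deduplicating with dict.fromkeys.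
import Mathlib
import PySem

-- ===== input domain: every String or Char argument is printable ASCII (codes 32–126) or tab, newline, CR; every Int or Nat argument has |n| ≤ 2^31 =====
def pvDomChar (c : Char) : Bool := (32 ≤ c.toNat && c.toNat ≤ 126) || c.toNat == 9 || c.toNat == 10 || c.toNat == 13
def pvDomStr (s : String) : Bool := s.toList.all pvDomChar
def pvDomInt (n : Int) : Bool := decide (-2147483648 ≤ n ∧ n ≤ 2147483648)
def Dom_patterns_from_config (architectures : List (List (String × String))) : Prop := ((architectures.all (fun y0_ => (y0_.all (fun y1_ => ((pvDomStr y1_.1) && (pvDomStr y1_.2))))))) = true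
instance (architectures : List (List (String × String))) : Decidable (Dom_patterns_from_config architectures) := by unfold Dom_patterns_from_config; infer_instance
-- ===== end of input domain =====

-- B tags every name once with its group (first match over a keyword priority list), then builds each
-- group by filtering the tagged list and deduplicating with dict.fromkeys; objective: alternative.

-- ===== PORT A =====
-- arch.get('config_name') or arch.get('name') or ''
def pfcNameA (arch : List (String × String)) : String :=
  match (PySem.Dict.mk arch).get? "config_name" with
  | some s => if s = "" then (match (PySem.Dict.mk arch).get? "name" with
                              | some t => if t = "" then "" else t
                              | none => "")
              else s
  | none => (match (PySem.Dict.mk arch).get? "name" with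
             | some t => if t = "" then "" else t
             | none => "")

-- one iteration of A's classification loop; state = (linear, sae, attention, act_sim)
def pfcStepA (st : List String × List String × List String × List String)
    (arch : List (String × String)) : List String × List String × List String × List String :=
  let config_name := pfcNameA arch
  let lname := PySem.Str.lower config_name
  if PySem.Str.isIn "sae" lname then (st.1, st.2.1 ++ [config_name], st.2.2.1, st.2.2.2)
  else if PySem.Str.isIn "act_sim" lname then (st.1, st.2.1, st.2.2.1, st.2.2.2 ++ [config_name])
  else if PySem.Str.isIn "attention" lname then (st.1, st.2.1, st.2.2.1 ++ [config_name], st.2.2.2)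
  else if PySem.Str.isIn "linear" lname then (st.1 ++ [config_name], st.2.1, st.2.2.1, st.2.2.2)
  else st

-- A's dedup pass: [p for p in l if not (p in seen or seen.add(p))]
def pfcDedupA (l : List String) : List String :=
  (l.foldl (fun (st : PySem.Set String × List String) p =>
      if PySem.Set.contains st.1 p then st else (PySem.Set.add st.1 p, st.2 ++ [p]))
    (PySem.Set.empty, [])).2

def patterns_from_config (architectures : List (List (String × String))) : List (String × List String) :=
  let st := architectures.foldl pfcStepA ([], [], [], [])
  [("linear", pfcDedupA st.1), ("sae", pfcDedupA st.2.1),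
   ("attention", pfcDedupA st.2.2.1), ("act_sim", pfcDedupA st.2.2.2)]

-- ===== PORT B =====
def pfcNameB (arch : List (String × String)) : String :=
  match (PySem.Dict.mk arch).get? "config_name" with
  | some s => if s = "" then (match (PySem.Dict.mk arch).get? "name" with
                              | some t => if t = "" then "" else t
                              | none => "")
              else s
  | none => (match (PySem.Dict.mk arch).get? "name" with
             | some t => if t = "" then "" else t
             | none => "")

-- KEYWORDS priority tuple
def pfcKeys : List String := ["sae", "act_sim", "attention", "linear"]

-- _classify: first keyword occurring in lname, else None
def pfcClassify (lname : String) : Option String :=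
  pfcKeys.find? (fun k => PySem.Str.isIn k lname)

def patterns_from_config_alt (architectures : List (List (String × String))) : List (String × List String) :=
  let tagged := architectures.map (fun arch =>
    let n := pfcNameB arch
    (pfcClassify (PySem.Str.lower n), n))
  ["linear", "sae", "attention", "act_sim"].map (fun g =>
    (g, PySem.List.dedup (tagged.filterMap (fun p => if p.1 = some g then some p.2 else none))))

-- ===== PRECONDITION & SPEC =====
def Spec_patterns_from_config (architectures : List (List (String × String))) (out : List (String × List String)) : Prop := out = patterns_from_config_alt architectures
instance (architectures : List (List (String × String))) (out : List (String × List String)) : Decidable (Spec_patterns_from_config architectures out) := by unfold Spec_patterns_from_config; infer_instance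

-- ===== CLAIM =====
def Claim_equal_patterns_from_config : Prop := ∀ (architectures : List (List (String × String))), Dom_patterns_from_config architectures → Spec_patterns_from_config architectures (patterns_from_config architectures)

-- ===== LEMMAS AND PROOFS =====

-- the category index A's elif chain assigns (0 sae, 1 act_sim, 2 attention, 3 linear, 4 none)
def pfcCat (arch : List (String × String)) : Nat :=
  let lname := PySem.Str.lower (pfcNameA arch)
  if PySem.Str.isIn "sae" lname then 0
  else if PySem.Str.isIn "act_sim" lname then 1
  else if PySem.Str.isIn "attention" lname then 2
  else if PySem.Str.isIn "linear" lname then 3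
  else 4

def pfcCatName (i : Nat) : Option String :=
  match i with
  | 0 => some "sae" | 1 => some "act_sim" | 2 => some "attention" | 3 => some "linear" | _ => none

def pfcCls (i : Nat) (archs : List (List (String × String))) : List String :=
  archs.filterMap (fun a => if pfcCat a = i then some (pfcNameA a) else none)

theorem pfcNameB_eq : pfcNameB = pfcNameA := rfl

theorem pfcCls_cons (i : Nat) (a : List (String × String)) (archs : List (List (String × String))) :
    pfcCls i (a :: archs) =
      (if pfcCat a = i then [pfcNameA a] else []) ++ pfcCls i archs := by
  simp [pfcCls, List.filterMap_cons]
  split_ifs <;> simp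

theorem pfcFoldA (archs : List (List (String × String))) :
    ∀ (l s a c : List String),
      archs.foldl pfcStepA (l, s, a, c) =
        (l ++ pfcCls 3 archs, s ++ pfcCls 0 archs, a ++ pfcCls 2 archs, c ++ pfcCls 1 archs) := by
  induction archs with
  | nil => intro l s a c; simp [pfcCls]
  | cons hd tl ih =>
    intro l s a c
    simp only [List.foldl_cons]
    rw [show pfcStepA (l, s, a, c) hd =
        (l ++ (if pfcCat hd = 3 then [pfcNameA hd] else []),
         s ++ (if pfcCat hd = 0 then [pfcNameA hd] else []),
         a ++ (if pfcCat hd = 2 then [pfcNameA hd] else []),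
         c ++ (if pfcCat hd = 1 then [pfcNameA hd] else [])) from by
      simp only [pfcStepA, pfcCat]
      split_ifs <;> simp_all]
    rw [ih]
    simp [pfcCls_cons, List.append_assoc]

-- B's classifier agrees with A's elif chain, through the index encoding
theorem pfcTag (a : List (String × String)) :
    pfcClassify (PySem.Str.lower (pfcNameA a)) = pfcCatName (pfcCat a) := by
  simp only [pfcClassify, pfcKeys, pfcCat, pfcCatName, List.find?]
  split_ifs <;> simp_all

-- B's per-group filter over the tagged list is exactly A's classified sublist
theorem pfcFilterMap (archs : List (List (String × String))) (g : String) (i : Nat)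
    (h : ∀ n, pfcCatName n = some g ↔ n = i) :
    (archs.map (fun arch =>
        let n := pfcNameB arch
        (pfcClassify (PySem.Str.lower n), n))).filterMap
      (fun p => if p.1 = some g then some p.2 else none) = pfcCls i archs := by
  rw [List.filterMap_map]
  unfold pfcCls
  apply List.filterMap_congr
  intro a _
  simp only [Function.comp, pfcNameB_eq, pfcTag, h]

-- A's seen-set fold keeps seen = out, so it computes the ordered-set fold
theorem pfcDedup_aux (l : List String) :
    ∀ (s : List String),
      (l.foldl (fun (st : PySem.Set String × List String) p =>
          if PySem.Set.contains st.1 p then st else (PySem.Set.add st.1 p, st.2 ++ [p])) (s, s))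
        = (l.foldl (fun t p => PySem.Set.add t p) s, l.foldl (fun t p => PySem.Set.add t p) s) := by
  induction l with
  | nil => intro s; rfl
  | cons hd tl ih =>
    intro s
    simp only [List.foldl_cons]
    by_cases h : hd ∈ s
    · rw [show (if PySem.Set.contains s hd = true then ((s, s) : PySem.Set String × List String)
            else (PySem.Set.add s hd, s ++ [hd])) = (s, s) from by simp [h],
          show PySem.Set.add s hd = s from by simp [PySem.Set.add, h]]
      exact ih s
    · rw [show (if PySem.Set.contains s hd = true then ((s, s) : PySem.Set String × List String)
            else (PySem.Set.add s hd, s ++ [hd])) = (s ++ [hd], s ++ [hd]) from by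
            simp [PySem.Set.add, h],
          show PySem.Set.add s hd = s ++ [hd] from by simp [PySem.Set.add, h]]
      exact ih (s ++ [hd])

-- A's dedup pass equals list(dict.fromkeys(l)), B's dedup
theorem pfcDedupA_eq (l : List String) : pfcDedupA l = PySem.List.dedup l := by
  have h1 : pfcDedupA l = l.foldl (fun t p => PySem.Set.add t p) PySem.Set.empty := by
    unfold pfcDedupA
    rw [show (PySem.Set.empty : PySem.Set String) = ([] : List String) from rfl]
    rw [pfcDedup_aux l []]
  have h2 : PySem.List.dedup l = PySem.Set.ofList l := by simp
  have h3 : PySem.Set.ofList l = l.foldl (fun t p => PySem.Set.add t p) PySem.Set.empty := rfl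
  rw [h1, h2, h3]

theorem pfcCatName_iff0 : ∀ n, pfcCatName n = some "sae" ↔ n = 0 := by
  intro n; rcases n with _|_|_|_|n <;> simp [pfcCatName]
theorem pfcCatName_iff1 : ∀ n, pfcCatName n = some "act_sim" ↔ n = 1 := by
  intro n; rcases n with _|_|_|_|n <;> simp [pfcCatName]
theorem pfcCatName_iff2 : ∀ n, pfcCatName n = some "attention" ↔ n = 2 := by
  intro n; rcases n with _|_|_|_|n <;> simp [pfcCatName]
theorem pfcCatName_iff3 : ∀ n, pfcCatName n = some "linear" ↔ n = 3 := by
  intro n; rcases n with _|_|_|_|n <;> simp [pfcCatName]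

-- ===== VERDICT =====
theorem patterns_from_config_spec : Claim_equal_patterns_from_config := by
  intro archs _
  unfold Spec_patterns_from_config patterns_from_config patterns_from_config_alt
  rw [pfcFoldA archs [] [] [] []]
  simp only [List.map_cons, List.map_nil, List.nil_append]
  rw [pfcFilterMap archs "linear" 3 pfcCatName_iff3,
      pfcFilterMap archs "sae" 0 pfcCatName_iff0,
      pfcFilterMap archs "attention" 2 pfcCatName_iff2,
      pfcFilterMap archs "act_sim" 1 pfcCatName_iff1]
  simp [pfcDedupA_eq]
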